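-- pv_equiv track=rewrite | github.com/krzyzuj/AssetUtilities | TextureUtilities/texture_utils.py | resolution_to_suffix
-- ===== SOURCE A (Python) =====
-- from typing import (Dict, Iterable, List, Optional, Set, Tuple)
--
-- def resolution_to_suffix(size: Tuple[int, int]) -> str:
-- # Tries to match the actual image size to a size suffix.
--
--     width = max(size)
--     for threshold, label in [
--         (512, "512"), (1024, "1K"), (2048, "2K"), (4096, "4K"), (8192, "8K")
--     ]:
--         if width <= threshold:
--             return label
--         # Returns the full size if it does not match any suffix threshold.
--     return f"{width}px"
-- ===== SOURCE B (Python) =====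
-- def resolution_to_suffix(size):
--     # Closed-form arithmetic: the label for 512 < w <= 8192 is "<2^bit_length((w-1)>>10)>K".
--     width = max(size)
--     if width <= 512:
--         return "512"
--     if width > 8192:
--         return f"{width}px"
--     return f"{1 << ((width - 1) >> 10).bit_length()}K"
-- ===== Notes on version B (the rewrite author's own statement) =====
-- stated objective: alternative
-- what changed: Replaces the linear first-match scan over the threshold table by a closed-form computation: two boundary checks plus the K-label derived arithmetically as 2^bit_length((width-1)>>10).
import Mathlib
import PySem

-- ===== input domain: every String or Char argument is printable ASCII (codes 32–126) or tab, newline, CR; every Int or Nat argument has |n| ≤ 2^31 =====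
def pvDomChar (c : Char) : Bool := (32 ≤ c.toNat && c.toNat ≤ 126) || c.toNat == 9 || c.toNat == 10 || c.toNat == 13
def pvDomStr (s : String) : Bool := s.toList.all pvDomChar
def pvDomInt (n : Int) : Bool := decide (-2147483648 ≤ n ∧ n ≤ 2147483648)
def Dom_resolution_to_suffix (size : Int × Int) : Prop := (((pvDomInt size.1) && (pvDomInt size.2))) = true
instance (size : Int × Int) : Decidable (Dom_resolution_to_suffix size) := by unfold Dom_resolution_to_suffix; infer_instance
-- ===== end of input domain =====

-- B replaces A's linear first-match scan over the threshold table by a closed-form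
-- arithmetic computation of the label (objective: alternative, same O(1) cost).


-- ===== PORT A =====
-- the loop 'for threshold, label in [...]: if width <= threshold: return label'
def rtsScan (width : Int) : List (Int × String) → String
  | [] => PySem.Int.toStr width ++ "px"
  | (t, l) :: rest => if width ≤ t then l else rtsScan width rest

def resolution_to_suffix (size : Int × Int) : String :=
  rtsScan (max size.1 size.2)
    [(512, "512"), (1024, "1K"), (2048, "2K"), (4096, "4K"), (8192, "8K")]

-- ===== PORT B =====
def resolution_to_suffix_alt (size : Int × Int) : String :=
  let width := max size.1 size.2
  if width ≤ 512 then "512"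
  else if 8192 < width then PySem.Int.toStr width ++ "px"
  else PySem.Int.toStr ((1 : Int) <<< PySem.Int.bitLength ((width - 1) >>> (10 : Nat))) ++ "K"

-- ===== PRECONDITION & SPEC =====
def Spec_resolution_to_suffix (size : Int × Int) (out : String) : Prop := out = resolution_to_suffix_alt size
instance (size : Int × Int) (out : String) : Decidable (Spec_resolution_to_suffix size out) := by unfold Spec_resolution_to_suffix; infer_instance

-- ===== CLAIM (what is proved, stated in full; the proofs are below) =====
def Claim_equal_resolution_to_suffix : Prop := ∀ (size : Int × Int), Dom_resolution_to_suffix size → Spec_resolution_to_suffix size (resolution_to_suffix size)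

-- ===== LEMMAS AND PROOFS =====
lemma rts_key (w : Int) :
    rtsScan w [(512, "512"), (1024, "1K"), (2048, "2K"), (4096, "4K"), (8192, "8K")] =
      (if w ≤ 512 then "512"
       else if 8192 < w then PySem.Int.toStr w ++ "px"
       else PySem.Int.toStr ((1 : Int) <<< PySem.Int.bitLength ((w - 1) >>> (10 : Nat))) ++ "K") := by
  simp only [rtsScan]
  rw [Int.shiftRight_eq_div_pow]
  by_cases h1 : w ≤ 512
  · simp [h1]
  by_cases h2 : w ≤ 1024
  · have hq : (w - 1) / 1024 = 0 := by omega
    simp [h1, h2, show ¬ (8192 : Int) < w by omega]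
    rw [hq]; decide
  by_cases h3 : w ≤ 2048
  · have hq : (w - 1) / 1024 = 1 := by omega
    simp [h1, h2, h3, show ¬ (8192 : Int) < w by omega]
    rw [hq]; decide
  by_cases h4 : w ≤ 4096
  · have hq : (w - 1) / 1024 = 2 ∨ (w - 1) / 1024 = 3 := by omega
    rcases hq with hq | hq <;>
      · simp [h1, h2, h3, h4, show ¬ (8192 : Int) < w by omega]
        rw [hq]; decide
  by_cases h5 : w ≤ 8192
  · have hb : (4 : Int) ≤ (w - 1) / 1024 ∧ (w - 1) / 1024 ≤ 7 := by omega
    have hq : (w - 1) / 1024 = 4 ∨ (w - 1) / 1024 = 5 ∨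
        (w - 1) / 1024 = 6 ∨ (w - 1) / 1024 = 7 := by omega
    rcases hq with hq | hq | hq | hq <;>
      · simp [h1, h2, h3, h4, h5, show ¬ (8192 : Int) < w by omega]
        rw [hq]; decide
  · simp [h1, h2, h3, h4, h5, show (8192 : Int) < w by omega]

-- ===== VERDICT (by name: the statement is the Claim_ definition above) =====
theorem resolution_to_suffix_spec : Claim_equal_resolution_to_suffix := by
  intro size _
  unfold Spec_resolution_to_suffix resolution_to_suffix resolution_to_suffix_alt
  exact rts_key (max size.1 size.2)
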